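-- pv_equiv track=rewrite | github.com/pypi-data/pypi-mirror-379 | packages/git-gq/git_gq-2.1.tar.gz/git_gq-2.1/src/git_gq/git_gq.py | unpack_list
-- ===== SOURCE A (Python) =====
-- def unpack_list(lst, elms):
--     """unpack 'elm' elements from list."""
--     new= []
--     l_lst= len(lst)
--     for i in range(elms):
--         # 0 .. (elms-1)
--         if i<l_lst:
--             new.append(lst[i])
--         else:
--             new.append(None)
--     return new
-- ===== SOURCE B (Python) =====
-- def unpack_list(lst, elms):
--     """unpack 'elm' elements from list."""
--     if elms <= 0:
--         return []
--     if elms == 1: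
--         return [lst[0] if lst else None]
--     h = elms // 2
--     return unpack_list(lst, h) + unpack_list(lst[h:], elms - h)
-- ===== Notes on version B (the rewrite author's own statement) =====
-- stated objective: alternative
-- what changed: Replaced A's single index loop with its per-element length comparison by a divide-and-conquer recursion: split the request at elms//2, solve each half (the right half on the sliced list), and concatenate; no index counter or length comparison appears.
import Mathlib
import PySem

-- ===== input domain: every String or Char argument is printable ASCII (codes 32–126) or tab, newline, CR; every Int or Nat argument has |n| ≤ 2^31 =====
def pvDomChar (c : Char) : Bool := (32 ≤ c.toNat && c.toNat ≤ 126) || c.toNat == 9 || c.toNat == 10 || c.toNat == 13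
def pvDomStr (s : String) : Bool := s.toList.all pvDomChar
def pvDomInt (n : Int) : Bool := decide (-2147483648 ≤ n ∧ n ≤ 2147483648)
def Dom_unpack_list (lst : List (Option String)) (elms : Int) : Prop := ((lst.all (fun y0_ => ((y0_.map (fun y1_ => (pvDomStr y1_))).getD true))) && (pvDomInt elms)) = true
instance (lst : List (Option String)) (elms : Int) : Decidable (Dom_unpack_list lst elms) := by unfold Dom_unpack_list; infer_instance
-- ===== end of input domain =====

-- B replaces A's index loop (compare i against len(lst) each step) by a
-- divide-and-conquer recursion: split the request at elms//2 and concatenate.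

-- ===== PORT A =====
-- literal port: new = []; for i in range(elms): append lst[i] if i < len(lst) else None
def unpack_list (lst : List (Option String)) (elms : Int) : List (Option String) :=
  (PySem.List.pyRange 0 elms 1).foldl
    (fun new i =>
      if i < (lst.length : Int) then
        new ++ [PySem.List.pyGetD lst i none]   -- guarded index, always in range here
      else
        new ++ [none])
    []

-- ===== PORT B =====
-- if elms <= 0: []; if elms == 1: [lst[0] if lst else None];
-- else h = elms // 2; recurse on (lst, h) and (lst[h:], elms - h) and concatenate.
def unpack_list_alt (lst : List (Option String)) (elms : Int) : List (Option String) :=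
  if elms ≤ 0 then []
  else if elms = 1 then [lst.headD none]
  else
    let h := PySem.Int.floordiv elms 2
    -- lst[h:] with 1 ≤ h: Python's slice from a nonnegative index = drop
    unpack_list_alt lst h ++ unpack_list_alt (lst.drop h.toNat) (elms - h)
termination_by elms.toNat
decreasing_by
  · have hd : PySem.Int.floordiv elms 2 = elms / 2 :=
      PySem.Int.floordiv_eq_ediv_of_pos (by omega)
    omega
  · have hd : PySem.Int.floordiv elms 2 = elms / 2 :=
      PySem.Int.floordiv_eq_ediv_of_pos (by omega)
    omega

-- ===== PRECONDITION & SPEC =====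
def Spec_unpack_list (lst : List (Option String)) (elms : Int) (out : List (Option String)) : Prop := out = unpack_list_alt lst elms
instance (lst : List (Option String)) (elms : Int) (out : List (Option String)) : Decidable (Spec_unpack_list lst elms out) := by unfold Spec_unpack_list; infer_instance

-- ===== CLAIM (what is proved, stated in full; the proofs are below) =====
def Claim_equal_unpack_list : Prop := ∀ (lst : List (Option String)) (elms : Int), Dom_unpack_list lst elms → Spec_unpack_list lst elms (unpack_list lst elms)

-- ===== LEMMAS AND PROOFS =====

-- proof-only characterisation: the first n entries of lst padded with none
def padSpec (lst : List (Option String)) (n : Nat) : List (Option String) :=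
  (List.range n).map (fun i => (lst[i]?).getD none)

theorem unpack_key (lst : List (Option String)) (n : Nat) :
    (PySem.List.pyRange 0 (n : Int) 1).foldl
      (fun new i =>
        if i < (lst.length : Int) then
          new ++ [PySem.List.pyGetD lst i none]
        else
          new ++ [none])
      []
    = (lst ++ List.replicate n none).take n := by
  induction n with
  | zero => simp
  | succ n ih =>
      have hr : PySem.List.pyRange 0 ((n : Int) + 1) 1
          = PySem.List.pyRange 0 (n : Int) 1 ++ [(n : Int)] :=
        PySem.List.pyRange_one_succ_right (by exact_mod_cast Nat.zero_le n)
      push_cast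
      rw [hr, List.foldl_append, ih]
      have hrep : List.replicate (n + 1) (none : Option String)
          = List.replicate n none ++ [none] := by
        simp [List.replicate_succ']
      rw [hrep, ← List.append_assoc]
      have hlen : n ≤ (lst ++ List.replicate n (none : Option String)).length := by
        simp only [List.length_append, List.length_replicate]; omega
      rw [List.take_add_one, List.take_append_of_le_length hlen]
      simp only [List.foldl_cons, List.foldl_nil]
      by_cases h : (n : Int) < (lst.length : Int)
      · have hn : n < lst.length := by exact_mod_cast h
        rw [if_pos h]
        have : ((lst ++ List.replicate n (none : Option String)) ++ [none])[n]? = some lst[n] := by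
          rw [List.getElem?_append_left (by simp; omega),
              List.getElem?_append_left (by omega)]
          simp
        rw [this]
        simp [PySem.List.pyGetD_eq_getElem lst ((n:Int)) none (by positivity) h,
              List.getElem?_eq_getElem hn]
      · have hn : ¬ n < lst.length := by exact_mod_cast h
        rw [if_neg h]
        have : ((lst ++ List.replicate n (none : Option String)) ++ [none])[n]? = some none := by
          rw [List.append_assoc, ← hrep, List.getElem?_append_right (by omega),
              List.getElem?_replicate, if_pos (by omega)]
        rw [this]
        simp

theorem take_eq_pad (lst : List (Option String)) (n : Nat) :
    (lst ++ List.replicate n none).take n = padSpec lst n := by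
  apply List.ext_getElem
  · simp [padSpec]
  · intro i h1 h2
    have hi : i < n := by simpa [padSpec] using h2
    rw [List.getElem_take]
    simp only [padSpec, List.getElem_map, List.getElem_range]
    by_cases h : i < lst.length
    · rw [List.getElem_append_left h, List.getElem?_eq_getElem h]
      rfl
    · rw [List.getElem_append_right (by omega), List.getElem_replicate,
          List.getElem?_eq_none (by omega)]
      rfl

theorem pad_split (lst : List (Option String)) (h k : Nat) :
    padSpec lst (h + k) = padSpec lst h ++ padSpec (lst.drop h) k := by
  unfold padSpec
  rw [List.range_add, List.map_append, List.map_map]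
  congr 1
  apply List.map_congr_left
  intro i _
  simp [List.getElem?_drop]

theorem alt_eq_pad (n : Nat) : ∀ lst : List (Option String),
    unpack_list_alt lst (n : Int) = padSpec lst n := by
  induction n using Nat.strong_induction_on with
  | _ n ih =>
    intro lst
    match n with
    | 0 => rw [unpack_list_alt]; simp [padSpec]
    | 1 =>
        rw [unpack_list_alt]
        norm_num
        cases lst <;> simp [padSpec, List.range_succ]
    | (m + 2) =>
        rw [unpack_list_alt]
        rw [if_neg (by push_cast; omega), if_neg (by push_cast; omega)]
        have hfd : PySem.Int.floordiv ((m + 2 : Nat) : Int) 2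
            = (((m + 2) / 2 : Nat) : Int) := by
          exact_mod_cast PySem.Int.floordiv_natCast (m + 2) 2
        simp only [hfd]
        have h1 : (((m + 2) / 2 : Nat) : Int).toNat = (m + 2) / 2 := by omega
        have h2 : ((m + 2 : Nat) : Int) - (((m + 2) / 2 : Nat) : Int)
            = (((m + 2) - (m + 2) / 2 : Nat) : Int) := by push_cast; omega
        rw [h1, h2, ih _ (by omega) lst, ih _ (by omega) _]
        rw [← pad_split]
        congr 1
        omega

-- ===== VERDICT (by name: the statement is the Claim_ definition above) =====
theorem unpack_list_spec : Claim_equal_unpack_list := by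
  intro lst elms _
  unfold Spec_unpack_list
  by_cases h : 0 ≤ elms
  · obtain ⟨n, rfl⟩ : ∃ n : Nat, elms = (n : Int) := ⟨elms.toNat, by omega⟩
    rw [unpack_list, unpack_key lst n, take_eq_pad, alt_eq_pad]
  · rw [unpack_list, unpack_list_alt, if_pos (by omega),
        PySem.List.pyRange_one_eq_nil (by omega)]
    rfl
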